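-- pv_equiv track=rewrite | github.com/GUWYDS/exercise | compare.py | merge_continuous_ngrams
-- ===== SOURCE A (Python) =====
-- from typing import List, Tuple, Set
--
-- def merge_continuous_ngrams(ngram_list: List[Tuple[str, ...]], intersection: Set[Tuple[str, ...]]) -> List[str]:
--     """
--     Merges overlapping n-grams into continuous strings for better readability.
--     """
--     merged_sentences = []
--     if not ngram_list:
--         return merged_sentences
--
--     current_sentence = []
--
--     for i in range(len(ngram_list)):
--         gram = ngram_list[i]
--
--         if gram in intersection:
--             if not current_sentence:
--                 current_sentence = list(gram)
--             else:
--                 # Append the last word of the sliding window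
--                 current_sentence.append(gram[-1])
--         else:
--             if current_sentence:
--                 merged_sentences.append(" ".join(current_sentence))
--                 current_sentence = []
--
--     if current_sentence:
--         merged_sentences.append(" ".join(current_sentence))
--
--     return merged_sentences
-- ===== SOURCE B (Python) =====
-- from typing import List, Tuple, Set
--
-- def _split_runs(ngram_list: List[Tuple[str, ...]], intersection: Set[Tuple[str, ...]]):
--     """Stage 1: partition the list into maximal (key, run) segments of
--     constant membership in `intersection`."""
--     runs = []
--     rest = ngram_list
--     while rest:
--         k = rest[0] in intersection
--         m = 1
--         while m < len(rest) and (rest[m] in intersection) == k: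
--             m += 1
--         runs.append((k, rest[:m]))
--         rest = rest[m:]
--     return runs
--
-- def merge_continuous_ngrams(ngram_list: List[Tuple[str, ...]], intersection: Set[Tuple[str, ...]]) -> List[str]:
--     """Staged: split into labeled maximal runs first, then emit one
--     closed-form sentence per member run (head words + last word of each
--     following n-gram) — no running buffer, no flush state."""
--     merged_sentences = []
--     for k, run in _split_runs(ngram_list, intersection):
--         if k:
--             words = list(run[0]) + [g[-1] for g in run[1:]]
--             if words:
--                 merged_sentences.append(" ".join(words))
--     return merged_sentences
-- ===== Notes on version B (the rewrite author's own statement) =====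
-- stated objective: alternative
-- what changed: Replaced A's element-wise accumulator with flush-on-nonmember by a staged decomposition: first partition the list into labeled maximal runs of constant membership, then map a closed-form sentence (head n-gram's words plus the last word of each following n-gram) over the member runs.
-- outside the precondition, e.g. on merge_continuous_ngrams([(), ('a', 'b')], {('a', 'b'), ()}): A returns ['a b'], B returns ['b']
import Mathlib
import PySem

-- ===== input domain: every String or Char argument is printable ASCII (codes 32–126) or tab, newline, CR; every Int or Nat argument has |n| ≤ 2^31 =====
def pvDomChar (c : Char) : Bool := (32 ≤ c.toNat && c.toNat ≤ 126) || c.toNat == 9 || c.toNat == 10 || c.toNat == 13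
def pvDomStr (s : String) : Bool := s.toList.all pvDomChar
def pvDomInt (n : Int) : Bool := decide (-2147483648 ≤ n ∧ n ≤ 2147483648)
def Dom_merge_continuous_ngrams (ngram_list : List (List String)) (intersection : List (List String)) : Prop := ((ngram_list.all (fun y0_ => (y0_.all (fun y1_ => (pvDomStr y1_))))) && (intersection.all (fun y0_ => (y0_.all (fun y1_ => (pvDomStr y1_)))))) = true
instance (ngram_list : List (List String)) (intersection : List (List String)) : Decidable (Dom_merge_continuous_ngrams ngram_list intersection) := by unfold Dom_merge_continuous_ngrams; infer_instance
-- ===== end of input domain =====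

-- B replaces A's element-wise accumulator-with-flush by a staged decomposition: first
-- partition the list into labeled maximal runs of constant membership, then map a
-- closed-form sentence over the member runs (alternative decomposition, same cost).

-- ===== PORT A =====
-- one iteration of A's for-loop; state = (merged_sentences, current_sentence)
def pvAStep (intersection : List (List String)) (st : List String × List String) (gram : List String) : List String × List String :=
  if gram ∈ intersection then
    if st.2 = [] then (st.1, gram)
    else (st.1, st.2 ++ [(PySem.List.pyGet? gram (-1)).getD ""])   -- gram[-1]; none (IndexError) excluded by Pre_
  else
    if st.2 ≠ [] then (st.1 ++ [PySem.Str.join " " st.2], []) else st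

def merge_continuous_ngrams (ngram_list : List (List String)) (intersection : List (List String)) : List String :=
  if ngram_list = [] then []
  else
    let st := ngram_list.foldl (pvAStep intersection) ([], [])
    if st.2 ≠ [] then st.1 ++ [PySem.Str.join " " st.2] else st.1

-- ===== PORT B =====
-- the membership key `g in intersection` of Source B
def pvKey (intersection : List (List String)) (g : List String) : Bool := decide (g ∈ intersection)

-- Source B's `_split_runs`: partition into maximal (key, run) segments of constant key;
-- the inner while counting `m` is `takeWhile`, `rest[:m]` / `rest[m:]` the two slices
def pvSplitRuns (intersection : List (List String)) : List (List String) → List (Bool × List (List String))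
  | [] => []
  | g :: rest =>
    (pvKey intersection g, g :: rest.takeWhile (fun x => pvKey intersection x == pvKey intersection g)) ::
      pvSplitRuns intersection (rest.dropWhile (fun x => pvKey intersection x == pvKey intersection g))
  termination_by l => l.length
  decreasing_by exact Nat.lt_succ_of_le (List.length_dropWhile_le ..)

-- Source B's closed-form sentence: `list(run[0]) + [g[-1] for g in run[1:]]`
def pvWords (run : List (List String)) : List String :=
  match run with
  | [] => []    -- unreachable: _split_runs only yields nonempty runs (run[0] would raise)
  | h :: t => h ++ t.map (fun g => (PySem.List.pyGet? g (-1)).getD "")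

def merge_continuous_ngrams_alt (ngram_list : List (List String)) (intersection : List (List String)) : List String :=
  (pvSplitRuns intersection ngram_list).foldl
    (fun merged_sentences kr =>
      if kr.1 then
        let words := pvWords kr.2
        if words ≠ [] then merged_sentences ++ [PySem.Str.join " " words] else merged_sentences
      else merged_sentences) []

-- ===== PRECONDITION & SPEC =====
-- Pre_ excludes inputs where the empty n-gram occurs in ngram_list while also being in intersection:
-- there A raises IndexError on ()[-1] whenever the running buffer is nonempty, and where it does
-- return, its value is an artifact of the empty buffer staying falsy after `current_sentence = list(())`.
def Pre_merge_continuous_ngrams (ngram_list : List (List String)) (intersection : List (List String)) : Prop :=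
  ¬(([] : List String) ∈ intersection ∧ ([] : List String) ∈ ngram_list)
instance (ngram_list : List (List String)) (intersection : List (List String)) : Decidable (Pre_merge_continuous_ngrams ngram_list intersection) := by unfold Pre_merge_continuous_ngrams; infer_instance

def pvWitness_merge_continuous_ngrams : List (List String) × List (List String) :=
  ([["a", "b"], ["b", "c"], ["x"]], [["a", "b"], ["b", "c"]])

def Spec_merge_continuous_ngrams (ngram_list : List (List String)) (intersection : List (List String)) (out : List String) : Prop := out = merge_continuous_ngrams_alt ngram_list intersection
instance (ngram_list : List (List String)) (intersection : List (List String)) (out : List String) : Decidable (Spec_merge_continuous_ngrams ngram_list intersection out) := by unfold Spec_merge_continuous_ngrams; infer_instance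

-- ===== CLAIM (what is proved, stated in full; the proofs are below) =====
def Claim_equal_merge_continuous_ngrams : Prop := ∀ (ngram_list : List (List String)) (intersection : List (List String)), Dom_merge_continuous_ngrams ngram_list intersection → Pre_merge_continuous_ngrams ngram_list intersection → Spec_merge_continuous_ngrams ngram_list intersection (merge_continuous_ngrams ngram_list intersection)

-- ===== LEMMAS AND PROOFS =====

-- A's loop from state (merged, cur), followed by the final flush
def pvAFin (intersection : List (List String)) (merged cur : List String) (l : List (List String)) : List String :=
  let st := l.foldl (pvAStep intersection) (merged, cur)
  if st.2 ≠ [] then st.1 ++ [PySem.Str.join " " st.2] else st.1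

-- B's second stage as a named fold step (for readability of the lemmas)
def pvBStep (merged : List String) (kr : Bool × List (List String)) : List String :=
  if kr.1 then
    let words := pvWords kr.2
    if words ≠ [] then merged ++ [PySem.Str.join " " words] else merged
  else merged

-- non-members are a no-op for A when the buffer is empty
theorem pvNoop (intersection : List (List String)) (l : List (List String)) (merged : List String)
    (h : ∀ x ∈ l, x ∉ intersection) :
    l.foldl (pvAStep intersection) (merged, []) = (merged, []) := by
  induction l with
  | nil => rfl
  | cons g rest ih =>
    have hg : g ∉ intersection := h g List.mem_cons_self
    simp only [List.foldl_cons]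
    rw [show pvAStep intersection (merged, []) g = (merged, []) from by simp [pvAStep, hg]]
    exact ih (fun x hx => h x (List.mem_cons_of_mem _ hx))

-- a run of members appends each gram's last word to a nonempty buffer
theorem pvRun (intersection : List (List String)) (run : List (List String)) :
    ∀ merged cur, cur ≠ [] → (∀ x ∈ run, x ∈ intersection) →
    run.foldl (pvAStep intersection) (merged, cur) =
      (merged, cur ++ run.map (fun g => (PySem.List.pyGet? g (-1)).getD "")) := by
  induction run with
  | nil => intro merged cur _ _; simp
  | cons g rest ih =>
    intro merged cur hc h
    have hg : g ∈ intersection := h g List.mem_cons_self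
    simp only [List.foldl_cons, pvAStep, hg, if_pos, if_neg hc]
    rw [ih merged _ (by simp) (fun x hx => h x (List.mem_cons_of_mem _ hx))]
    simp

-- with a nonempty buffer, if the remaining list is empty or starts with a non-member,
-- A flushes the buffer first and then proceeds with an empty buffer
theorem pvFlush (intersection : List (List String)) (merged cur : List String) (hc : cur ≠ [])
    (rest : List (List String))
    (h : rest = [] ∨ ∃ g t, rest = g :: t ∧ g ∉ intersection) :
    pvAFin intersection merged cur rest =
      pvAFin intersection (merged ++ [PySem.Str.join " " cur]) [] rest := by
  rcases h with h | ⟨g, t, rfl, hg⟩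
  · subst h; simp [pvAFin, hc]
  · simp only [pvAFin, List.foldl_cons]
    rw [show pvAStep intersection (merged, cur) g = (merged ++ [PySem.Str.join " " cur], []) from by
          simp [pvAStep, hg, hc],
        show pvAStep intersection (merged ++ [PySem.Str.join " " cur], []) g =
            (merged ++ [PySem.Str.join " " cur], []) from by simp [pvAStep, hg]]

-- the head of dropWhile fails the predicate
theorem pvDropWhileHead {α : Type} (p : α → Bool) :
    ∀ (l : List α) (g : α) (t : List α), l.dropWhile p = g :: t → p g = false := by
  intro l
  induction l with
  | nil => intro g t h; simp [List.dropWhile] at h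
  | cons a as ih =>
    intro g t h
    by_cases ha : p a = true
    · rw [List.dropWhile_cons_of_pos ha] at h; exact ih g t h
    · rw [List.dropWhile_cons_of_neg ha] at h
      cases h; simpa using ha

-- main invariant: A's loop with flush from an empty buffer = B's fold over the runs
theorem pvMain (intersection : List (List String)) :
    ∀ n l, l.length ≤ n → (([] : List String) ∈ intersection → ([] : List String) ∉ l) →
    ∀ merged, pvAFin intersection merged [] l =
      (pvSplitRuns intersection l).foldl pvBStep merged := by
  intro n
  induction n with
  | zero =>
    intro l hl _ merged
    have : l = [] := List.eq_nil_of_length_eq_zero (Nat.le_zero.mp hl)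
    subst this
    simp [pvAFin, pvSplitRuns]
  | succ m ih =>
    intro l hl hne merged
    cases l with
    | nil => simp [pvAFin, pvSplitRuns]
    | cons g rest =>
      have hrest : rest.length ≤ m := Nat.lt_succ_iff.mp (by simpa using hl)
      set p := fun x => pvKey intersection x == pvKey intersection g with hp
      set run := rest.takeWhile p with hrun
      set rest' := rest.dropWhile p with hrest'
      have hsplit : rest = run ++ rest' := (List.takeWhile_append_dropWhile).symm
      have hlen' : rest'.length ≤ m := le_trans (List.length_dropWhile_le ..) hrest
      have hne' : ([] : List String) ∈ intersection → ([] : List String) ∉ rest' := by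
        intro hi hr
        exact hne hi (List.mem_cons_of_mem _ ((List.dropWhile_sublist _).subset hr))
      have hsr : pvSplitRuns intersection (g :: rest) =
          (pvKey intersection g, g :: run) :: pvSplitRuns intersection rest' := by
        rw [pvSplitRuns]
      by_cases hg : g ∈ intersection
      · -- member run: one sentence is emitted
        have hgkey : pvKey intersection g = true := by simp [pvKey, hg]
        have hrunmem : ∀ x ∈ run, x ∈ intersection := by
          intro x hx
          have := List.mem_takeWhile_imp hx
          simp only [hp, hgkey, beq_iff_eq] at this
          simpa [pvKey] using this
        have hgne : g ≠ [] := by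
          intro hgeq; subst hgeq; exact hne hg List.mem_cons_self
        -- A's side: consume g, then the run, then flush before rest'
        have h1 : pvAFin intersection merged [] (g :: rest) =
            pvAFin intersection merged (pvWords (g :: run)) rest' := by
          simp only [pvAFin, hsplit, List.foldl_cons, List.foldl_append]
          rw [show pvAStep intersection (merged, []) g = (merged, g) by
            simp [pvAStep, hg]]
          rw [pvRun intersection run merged g hgne hrunmem]
          simp [pvWords]
        have hWne : pvWords (g :: run) ≠ [] := by simp [pvWords, hgne]
        have h2 := pvFlush intersection merged (pvWords (g :: run)) hWne rest' (by
          cases hr : rest' with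
          | nil => exact Or.inl rfl
          | cons a t =>
            refine Or.inr ⟨a, t, rfl, ?_⟩
            have := pvDropWhileHead p rest a t (hrest' ▸ hr)
            simp only [hp, hgkey] at this
            simpa [pvKey] using this)
        rw [h1, h2, ih rest' hlen' hne']
        rw [hsr]
        simp [List.foldl_cons, pvBStep, hgkey, hWne]
      · -- non-member run: skipped entirely
        have hgkey : pvKey intersection g = false := by simp [pvKey, hg]
        have hrunmem : ∀ x ∈ run, x ∉ intersection := by
          intro x hx
          have := List.mem_takeWhile_imp hx
          simp only [hp, hgkey, beq_iff_eq] at this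
          simpa [pvKey] using this
        have h1 : pvAFin intersection merged [] (g :: rest) =
            pvAFin intersection merged [] rest' := by
          simp only [pvAFin, hsplit, List.foldl_cons, List.foldl_append]
          rw [show pvAStep intersection (merged, []) g = (merged, []) by
            simp [pvAStep, hg]]
          rw [pvNoop intersection run merged hrunmem]
        rw [h1, ih rest' hlen' hne', hsr]
        simp [List.foldl_cons, pvBStep, hgkey]

-- ===== VERDICT (by name: the statement is the Claim_ definition above) =====
theorem merge_continuous_ngrams_spec : Claim_equal_merge_continuous_ngrams := by
  intro ngram_list intersection _ hpre
  unfold Spec_merge_continuous_ngrams merge_continuous_ngrams merge_continuous_ngrams_alt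
  have hne : ([] : List String) ∈ intersection → ([] : List String) ∉ ngram_list := by
    intro hi hl; exact hpre ⟨hi, hl⟩
  by_cases h : ngram_list = []
  · subst h; simp [pvSplitRuns]
  · simp only [h, ite_false]
    have := pvMain intersection ngram_list.length ngram_list le_rfl hne []
    simp only [pvAFin] at this
    rw [this]
    rfl
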